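-- pv_equiv track=rewrite | github.com/gerard-kanters/mcp-linux-tools | server.py | _set_enabled
-- ===== SOURCE A (Python) =====
-- from typing import Optional, List, Any
--
-- def _set_enabled(section: str, job_id: str, enabled: bool) -> str:
--     lines = section.splitlines()
--     out: List[str] = []
--     i = 0
--     while i < len(lines):
--         if lines[i].startswith("# MCP: id=") and f"id={job_id}" in lines[i]:
--             out.append(f"# MCP: id={job_id} enabled={'1' if enabled else '0'}")
--             i += 1
--             if i < len(lines) and not lines[i].startswith("#"):
--                 cron = lines[i]
--                 if enabled and cron.startswith("# "):
--                     out.append(cron[2:])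
--                 elif (not enabled) and not cron.startswith("# "):
--                     out.append("# " + cron)
--                 else:
--                     out.append(cron)
--                 i += 1
--             continue
--         out.append(lines[i]); i += 1
--     return "\n".join(out) + ("\n" if out and not out[-1].endswith("\n") else "")
-- ===== SOURCE B (Python) =====
-- def _set_enabled(section: str, job_id: str, enabled: bool) -> str:
--     marker = f"# MCP: id={job_id} enabled={'1' if enabled else '0'}"
--     lines = section.splitlines()
--     out = []
--     while True:
--         k = next((i for i, l in enumerate(lines)
--                   if l.startswith("# MCP: id=") and f"id={job_id}" in l), None)
--         if k is None:
--             out += lines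
--             break
--         out += lines[:k]
--         out.append(marker)
--         rest = lines[k + 1:]
--         if rest and not rest[0].startswith("#"):
--             out.append(rest[0] if enabled else "# " + rest[0])
--             lines = rest[1:]
--         else:
--             lines = rest
--     return "\n".join(out) + ("\n" if out and not out[-1].endswith("\n") else "")
-- ===== Notes on version B (the rewrite author's own statement) =====
-- stated objective: alternative
-- what changed: Replaces A's line-by-line while loop with index lookahead by a find-and-splice loop: repeatedly locate the next marker line, copy the whole untouched segment before it with one slice, emit the normalized marker and the toggled cron line, and continue on the remaining slice.
import Mathlib
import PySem

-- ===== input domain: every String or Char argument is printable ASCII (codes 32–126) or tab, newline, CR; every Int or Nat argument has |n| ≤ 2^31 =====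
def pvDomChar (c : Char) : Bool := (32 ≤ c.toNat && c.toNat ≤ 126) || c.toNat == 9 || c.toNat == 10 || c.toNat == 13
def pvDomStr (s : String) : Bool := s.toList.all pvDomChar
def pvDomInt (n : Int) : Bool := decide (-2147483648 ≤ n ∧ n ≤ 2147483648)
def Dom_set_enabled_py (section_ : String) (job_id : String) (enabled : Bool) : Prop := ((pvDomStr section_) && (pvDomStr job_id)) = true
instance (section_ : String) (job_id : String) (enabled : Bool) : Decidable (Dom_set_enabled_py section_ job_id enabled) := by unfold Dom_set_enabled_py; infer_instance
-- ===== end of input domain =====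

-- B replaces A's line-by-line loop with lookahead by a find-and-splice loop (alternative decomposition); return value only, no mutation involved.

-- ===== PORT A =====
-- literal port of A's while loop with index i and lookahead at lines[i+1]
def setEnLoopA (job_id : String) (enabled : Bool) : List String → List String
  | [] => []
  | l :: rest =>
    if PySem.Str.startswith l "# MCP: id=" && PySem.Str.isIn ("id=" ++ job_id) l then
      ("# MCP: id=" ++ job_id ++ " enabled=" ++ (if enabled then "1" else "0")) ::
      (match rest with
       | [] => setEnLoopA job_id enabled []
       | r :: rest' =>
         if !(PySem.Str.startswith r "#") then
           (if enabled && PySem.Str.startswith r "# " then PySem.Str.slice r (some 2) none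
            else if !enabled && !(PySem.Str.startswith r "# ") then "# " ++ r
            else r) :: setEnLoopA job_id enabled rest'
         else setEnLoopA job_id enabled (r :: rest'))
    else l :: setEnLoopA job_id enabled rest
  termination_by xs => xs.length
  decreasing_by all_goals simp_all

def set_enabled_py (section_ : String) (job_id : String) (enabled : Bool) : String :=
  let out := setEnLoopA job_id enabled (PySem.Str.splitlines section_)
  PySem.Str.join "\n" out ++
    (match out.getLast? with
     | none => ""
     | some last => if PySem.Str.endswith last "\n" then "" else "\n")

-- ===== PORT B =====
-- the normalized marker line Source B precomputes
def pvMarkerLine (job_id : String) (enabled : Bool) : String :=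
  "# MCP: id=" ++ job_id ++ " enabled=" ++ (if enabled then "1" else "0")

-- Source B's `next((i for i, l in enumerate(lines) if …), None)`: index of the first marker line
def firstMarkerIdx (job_id : String) : List String → Option Nat
  | [] => none
  | l :: rest =>
    if PySem.Str.startswith l "# MCP: id=" && PySem.Str.isIn ("id=" ++ job_id) l then some 0
    else (firstMarkerIdx job_id rest).map (· + 1)

-- Source B's while-True find-and-splice loop, `out` the accumulator
def spliceB (job_id : String) (enabled : Bool) (out : List String) (lines : List String) : List String :=
  match h : firstMarkerIdx job_id lines with
  | none => out ++ lines
  | some k =>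
    match hr : lines.drop (k + 1) with
    | [] => spliceB job_id enabled (out ++ lines.take k ++ [pvMarkerLine job_id enabled]) []
    | r :: rest' =>
      if !(PySem.Str.startswith r "#") then
        spliceB job_id enabled
          (out ++ lines.take k ++ [pvMarkerLine job_id enabled, if enabled then r else "# " ++ r]) rest'
      else
        spliceB job_id enabled (out ++ lines.take k ++ [pvMarkerLine job_id enabled]) (r :: rest')
  termination_by lines.length
  decreasing_by
  · have hne : lines ≠ [] := by intro hnil; rw [hnil] at h; simp [firstMarkerIdx] at h
    cases lines with
    | nil => exact absurd rfl hne
    | cons a as => simp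
  · have := congrArg List.length hr
    simp only [List.length_drop, List.length_cons] at this
    omega
  · have := congrArg List.length hr
    simp only [List.length_drop, List.length_cons] at this
    simp only [List.length_cons]
    omega

def set_enabled_py_alt (section_ : String) (job_id : String) (enabled : Bool) : String :=
  let out := spliceB job_id enabled [] (PySem.Str.splitlines section_)
  PySem.Str.join "\n" out ++
    (match out.getLast? with
     | none => ""
     | some last => if PySem.Str.endswith last "\n" then "" else "\n")

-- ===== PRECONDITION & SPEC =====
def Spec_set_enabled_py (section_ : String) (job_id : String) (enabled : Bool) (out : String) : Prop := out = set_enabled_py_alt section_ job_id enabled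
instance (section_ : String) (job_id : String) (enabled : Bool) (out : String) : Decidable (Spec_set_enabled_py section_ job_id enabled out) := by unfold Spec_set_enabled_py; infer_instance

-- ===== CLAIM (what is proved, stated in full; the proofs are below) =====
def Claim_equal_set_enabled_py : Prop := ∀ (section_ : String) (job_id : String) (enabled : Bool), Dom_set_enabled_py section_ job_id enabled → Spec_set_enabled_py section_ job_id enabled (set_enabled_py section_ job_id enabled)

-- ===== LEMMAS AND PROOFS =====

-- proof-only helper naming A's lookahead step (the inner match of setEnLoopA)
def pvAuxA (j : String) (e : Bool) : List String → List String
  | [] => setEnLoopA j e []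
  | r :: rest' =>
    if !(PySem.Str.startswith r "#") then
      (if e && PySem.Str.startswith r "# " then PySem.Str.slice r (some 2) none
       else if !e && !(PySem.Str.startswith r "# ") then "# " ++ r
       else r) :: setEnLoopA j e rest'
    else setEnLoopA j e (r :: rest')

theorem setEnLoopA_cons (j : String) (e : Bool) (l : String) (rest : List String) :
    setEnLoopA j e (l :: rest) =
      if PySem.Str.startswith l "# MCP: id=" && PySem.Str.isIn ("id=" ++ j) l then
        pvMarkerLine j e :: pvAuxA j e rest
      else l :: setEnLoopA j e rest := by
  rw [setEnLoopA.eq_def]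
  cases rest <;> rfl

-- no marker line anywhere: A's loop copies the list unchanged
theorem pv_noMarker (j : String) (e : Bool) : ∀ xs : List String,
    firstMarkerIdx j xs = none → setEnLoopA j e xs = xs := by
  intro xs
  induction xs with
  | nil => intro _; simp [setEnLoopA]
  | cons l rest ih =>
    intro h
    rw [firstMarkerIdx] at h
    by_cases hm : (PySem.Str.startswith l "# MCP: id=" && PySem.Str.isIn ("id=" ++ j) l) = true
    · rw [if_pos hm] at h; exact absurd h (by simp)
    · rw [if_neg hm] at h
      rw [setEnLoopA_cons, if_neg hm, ih (by simpa using h)]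

-- first marker at k: A copies the first k lines and the element at k is a marker
theorem pv_firstMarker (j : String) (e : Bool) : ∀ (xs : List String) (k : Nat),
    firstMarkerIdx j xs = some k →
    ∃ m, xs.drop k = m :: xs.drop (k + 1) ∧
      (PySem.Str.startswith m "# MCP: id=" && PySem.Str.isIn ("id=" ++ j) m) = true ∧
      setEnLoopA j e xs = xs.take k ++ pvMarkerLine j e :: pvAuxA j e (xs.drop (k + 1)) := by
  intro xs
  induction xs with
  | nil => intro k h; simp [firstMarkerIdx] at h
  | cons l rest ih =>
    intro k h
    rw [firstMarkerIdx] at h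
    by_cases hm : (PySem.Str.startswith l "# MCP: id=" && PySem.Str.isIn ("id=" ++ j) l) = true
    · rw [if_pos hm] at h
      have hk : k = 0 := by simpa using h.symm
      subst hk
      exact ⟨l, by simp, hm, by rw [setEnLoopA_cons, if_pos hm]; simp⟩
    · rw [if_neg hm] at h
      cases hrest : firstMarkerIdx j rest with
      | none => rw [hrest] at h; simp at h
      | some k' =>
        rw [hrest] at h
        simp only [Option.map_some, Option.some.injEq] at h
        obtain ⟨m, hd, hmk, hA⟩ := ih k' hrest
        refine ⟨m, ?_, hmk, ?_⟩
        · simpa [← h, List.drop_succ_cons] using hd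
        · rw [setEnLoopA_cons, if_neg hm, hA, ← h]
          simp [List.take_succ_cons, List.drop_succ_cons]

-- "# " prefix implies "#" prefix (contrapositive used below)
theorem pv_start_hash_of_sp (l : String) (h : PySem.Chars.startswith l.toList ['#', ' '] = true) :
    PySem.Chars.startswith l.toList ['#'] = true := by
  rw [PySem.Chars.startswith_iff] at h ⊢
  exact List.IsPrefix.trans (by decide) h

-- on a line not starting with "#", A's three-way toggle equals B's two-way one
theorem pv_toggle (e : Bool) (r : String) (h : PySem.Str.startswith r "#" = false) :
    (if e && PySem.Str.startswith r "# " then PySem.Str.slice r (some 2) none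
     else if !e && !(PySem.Str.startswith r "# ") then "# " ++ r
     else r) = (if e then r else "# " ++ r) := by
  have hC : PySem.Chars.startswith r.toList ['#'] = false := by simpa using h
  have hsp : PySem.Str.startswith r "# " = false := by
    cases h2 : PySem.Str.startswith r "# " with
    | false => rfl
    | true =>
      have h3 : PySem.Chars.startswith r.toList ['#', ' '] = true := by simpa using h2
      have h4 := pv_start_hash_of_sp r h3
      rw [hC] at h4
      exact absurd h4 (by simp)
  rw [hsp]
  cases e <;> simp

-- main invariant: B's splice loop with accumulator `out` produces out ++ A's loop result
theorem pv_splice_eq (j : String) (e : Bool) : ∀ (n : Nat) (lines out : List String),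
    lines.length ≤ n → spliceB j e out lines = out ++ setEnLoopA j e lines := by
  intro n
  induction n with
  | zero =>
    intro lines out hlen
    have : lines = [] := by cases lines <;> simp_all
    subst this
    rw [spliceB]
    simp [firstMarkerIdx, setEnLoopA]
  | succ n ih =>
    intro lines out hlen
    rw [spliceB]
    split
    · next hnone => rw [pv_noMarker j e lines hnone]
    · next k hsome =>
      obtain ⟨m, hd, hmk, hA⟩ := pv_firstMarker j e lines k hsome
      have hklt : k < lines.length := by
        have := congrArg List.length hd
        simp at this; omega
      split
      · next hr =>
        rw [ih [] _ (by simp), hA, hr]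
        simp [pvAuxA, setEnLoopA]
      · next r rest' hr =>
        have hlr : lines.length - (k + 1) = rest'.length + 1 := by
          have := congrArg List.length hr
          simpa using this
        by_cases hsh : PySem.Str.startswith r "#" = true
        · have hshC : PySem.Chars.startswith r.toList ['#'] = true := by simpa using hsh
          have hcond : (!PySem.Str.startswith r "#") = false := by simp [hshC]
          rw [hcond]
          simp only [Bool.false_eq_true, if_false]
          rw [ih (r :: rest') _ (by simp only [List.length_cons]; omega), hA, hr]
          simp only [pvAuxA]
          rw [hcond]
          simp only [Bool.false_eq_true, if_false]
          simp
        · have hshf : PySem.Str.startswith r "#" = false := by simpa using hsh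
          have hshC : PySem.Chars.startswith r.toList ['#'] = false := by simpa using hshf
          have hcond : (!PySem.Str.startswith r "#") = true := by simp [hshC]
          rw [hcond]
          simp only [if_true]
          rw [ih rest' _ (by omega), hA, hr]
          simp only [pvAuxA]
          rw [hcond, if_pos rfl, pv_toggle e r hshf]
          simp

-- ===== VERDICT (by name: the statement is the Claim_ definition above) =====
theorem set_enabled_py_spec : Claim_equal_set_enabled_py := by
  intro section_ job_id enabled _
  unfold Spec_set_enabled_py set_enabled_py set_enabled_py_alt
  rw [pv_splice_eq job_id enabled (PySem.Str.splitlines section_).length _ [] (le_refl _)]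
  rfl
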